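-- pv_equiv track=rewrite | github.com/metfar/dailynews | dailynews_gui_v5.py | _summarize_for_daily_view
-- ===== SOURCE A (Python) =====
-- from typing import List;
--
-- def _summarize_for_daily_view(text: str, max_lines: int = 12, indent: str = "") -> str:
--     raw_lines = [line.rstrip() for line in text.splitlines()];
--     kept: List[str] = [];
--     for line in raw_lines:
--         stripped = line.strip();
--         if not stripped:
--             continue;
--         if stripped.startswith("Generated at ") or stripped.startswith("Host:"):
--             continue;
--         if stripped.startswith("# "):
--             continue;
--         kept.append(indent + stripped);
--         if len(kept) >= max_lines:
--             kept.append(indent + "...");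
--             break;
--     return "\n".join(kept) if kept else indent + "(no content)";
-- ===== SOURCE B (Python) =====
-- def _summarize_for_daily_view(text: str, max_lines: int = 12, indent: str = "") -> str:
--     def is_content(s: str) -> bool:
--         return bool(s) and not s.startswith(("Generated at ", "Host:", "# "))
--
--     def take(lines, budget):
--         # keep content lines while budget lasts; the last allowed one is
--         # followed by an ellipsis marker
--         for i, line in enumerate(lines):
--             s = line.strip()
--             if not is_content(s):
--                 continue
--             if budget <= 1:
--                 return [indent + s, indent + "..."]
--             return [indent + s] + take(lines[i + 1:], budget - 1)
--         return []
--
--     kept = take(text.splitlines(), max_lines)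
--     return "\n".join(kept) if kept else indent + "(no content)"
-- ===== Notes on version B (the rewrite author's own statement) =====
-- stated objective: alternative
-- what changed: B replaces A's accumulator loop with a mid-loop break by a recursive budget countdown: a helper takes up to `budget` content lines from the remaining lines, emitting the ellipsis when the budget is exhausted, so no kept-list length is ever inspected.
import Mathlib
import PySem

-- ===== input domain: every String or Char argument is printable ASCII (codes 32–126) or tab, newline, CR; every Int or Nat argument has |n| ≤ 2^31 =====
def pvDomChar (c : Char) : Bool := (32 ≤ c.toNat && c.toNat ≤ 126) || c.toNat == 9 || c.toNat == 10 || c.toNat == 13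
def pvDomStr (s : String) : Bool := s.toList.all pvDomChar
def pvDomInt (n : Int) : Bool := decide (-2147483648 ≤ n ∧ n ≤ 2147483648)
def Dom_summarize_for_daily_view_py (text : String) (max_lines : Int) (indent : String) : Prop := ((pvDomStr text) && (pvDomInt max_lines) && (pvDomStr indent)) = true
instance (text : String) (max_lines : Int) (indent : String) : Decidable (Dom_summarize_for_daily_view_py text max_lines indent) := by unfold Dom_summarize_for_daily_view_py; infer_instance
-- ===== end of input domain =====

-- B replaces A's accumulator loop (which breaks mid-loop after checking len(kept)) by a
-- recursive budget countdown over the remaining lines; objective: alternative decomposition.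


-- ===== PORT A =====
-- the 'for line in raw_lines' loop with its early 'break'; state = kept
def pvLoopA (ml : Int) (indent : String) : List String → List String → List String
  | [], kept => kept
  | line :: rest, kept =>
    let stripped := PySem.Str.strip line
    if stripped = "" then pvLoopA ml indent rest kept
    else if PySem.Str.startswith stripped "Generated at " || PySem.Str.startswith stripped "Host:" then
      pvLoopA ml indent rest kept
    else if PySem.Str.startswith stripped "# " then pvLoopA ml indent rest kept
    else
      let kept' := kept ++ [indent ++ stripped]
      if ml ≤ (kept'.length : Int) then kept' ++ [indent ++ "..."]
      else pvLoopA ml indent rest kept'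

def summarize_for_daily_view_py (text : String) (max_lines : Int) (indent : String) : String :=
  let raw_lines := (PySem.Str.splitlines text).map PySem.Str.rstrip
  let kept := pvLoopA max_lines indent raw_lines []
  if kept.isEmpty then indent ++ "(no content)" else PySem.Str.join "\n" kept

-- ===== PORT B =====
-- Source B's is_content(s)
def pvIsContent (s : String) : Bool :=
  s != "" && !(PySem.Str.startswith s "Generated at " || PySem.Str.startswith s "Host:" ||
               PySem.Str.startswith s "# ")

-- Source B's take(lines, budget): the for/continue scan to the next content line is the
-- recursion's skip branch; a recursive call on lines[i+1:] is the cons-tail here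
def pvTakeB (indent : String) : List String → Int → List String
  | [], _ => []
  | l :: rest, budget =>
    let s := PySem.Str.strip l
    if !(pvIsContent s) then pvTakeB indent rest budget
    else if budget ≤ 1 then [indent ++ s, indent ++ "..."]
    else (indent ++ s) :: pvTakeB indent rest (budget - 1)

def summarize_for_daily_view_py_alt (text : String) (max_lines : Int) (indent : String) : String :=
  let kept := pvTakeB indent (PySem.Str.splitlines text) max_lines
  if kept.isEmpty then indent ++ "(no content)" else PySem.Str.join "\n" kept

-- ===== PRECONDITION & SPEC =====
def Spec_summarize_for_daily_view_py (text : String) (max_lines : Int) (indent : String) (out : String) : Prop := out = summarize_for_daily_view_py_alt text max_lines indent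
instance (text : String) (max_lines : Int) (indent : String) (out : String) : Decidable (Spec_summarize_for_daily_view_py text max_lines indent out) := by unfold Spec_summarize_for_daily_view_py; infer_instance

-- ===== CLAIM (what is proved, stated in full; the proofs are below) =====
def Claim_equal_summarize_for_daily_view_py : Prop := ∀ (text : String) (max_lines : Int) (indent : String), Dom_summarize_for_daily_view_py text max_lines indent → Spec_summarize_for_daily_view_py text max_lines indent (summarize_for_daily_view_py text max_lines indent)

-- ===== LEMMAS AND PROOFS =====

theorem dropWhile_idem {α : Type} (p : α → Bool) (l : List α) :
    List.dropWhile p (List.dropWhile p l) = List.dropWhile p l := by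
  induction l with
  | nil => rfl
  | cons c t ih =>
    by_cases h : p c = true
    · simp [List.dropWhile, h, ih]
    · simp [List.dropWhile, h]

-- right-strip as a List Char operation
def pvR (p : Char → Bool) (m : List Char) : List Char := (List.dropWhile p m.reverse).reverse

theorem pvR_cons (p : Char → Bool) (c : Char) (t : List Char) :
    pvR p (c :: t) = if pvR p t = [] then (if p c then ([] : List Char) else [c])
                     else c :: pvR p t := by
  unfold pvR
  rw [List.reverse_cons, List.dropWhile_append]
  by_cases h : List.dropWhile p t.reverse = []
  · simp [h, List.dropWhile]
    by_cases hc : p c = true <;> simp [hc]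
  · have h2 : (List.dropWhile p t.reverse).isEmpty = false := by
      cases hdw : List.dropWhile p t.reverse <;> simp_all
    simp [h2, h]

theorem pvR_eq_nil_imp (p : Char → Bool) (t : List Char) (h : pvR p t = []) :
    List.dropWhile p t = [] := by
  have h' : List.dropWhile p t.reverse = [] := by
    unfold pvR at h
    cases hdw : List.dropWhile p t.reverse <;> simp_all
  apply List.dropWhile_eq_nil_iff.mpr
  intro x hx
  exact List.dropWhile_eq_nil_iff.mp h' x (by simpa using hx)

-- lstrip and rstrip commute (as List Char operations)
theorem lstrip_pvR_comm (p : Char → Bool) (l : List Char) :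
    List.dropWhile p (pvR p l) = pvR p (List.dropWhile p l) := by
  induction l with
  | nil => rfl
  | cons c t ih =>
    rw [pvR_cons]
    by_cases h : pvR p t = []
    · rw [if_pos h]
      by_cases hc : p c = true
      · simp only [hc, if_true]
        rw [show List.dropWhile p (c :: t) = [] from ?_]
        · rfl
        · simp [List.dropWhile, hc, pvR_eq_nil_imp p t h]
      · have hc' : p c = false := by simpa using hc
        simp [List.dropWhile, hc', pvR_cons, h]
    · rw [if_neg h]
      by_cases hc : p c = true
      · simp only [List.dropWhile, hc, ih]
      · have hc' : p c = false := by simpa using hc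
        have hlast : List.dropWhile p (c :: pvR p t) = c :: pvR p t := by
          simp [List.dropWhile, hc']
        rw [hlast]
        simp [List.dropWhile, hc', pvR_cons, h]

theorem pvR_idem (p : Char → Bool) (m : List Char) : pvR p (pvR p m) = pvR p m := by
  unfold pvR
  rw [List.reverse_reverse, dropWhile_idem]

-- strip (rstrip s) = strip s
theorem strip_rstrip (s : String) :
    PySem.Str.strip (PySem.Str.rstrip s) = PySem.Str.strip s := by
  have hdef : ∀ m : List Char,
      (List.dropWhile PySem.Chars.isspace m.reverse).reverse = pvR PySem.Chars.isspace m :=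
    fun _ => rfl
  simp only [PySem.Str.strip, PySem.Str.rstrip, PySem.Chars.strip, PySem.Chars.rstrip,
    PySem.Chars.lstrip, hdef, String.toList_ofList]
  rw [lstrip_pvR_comm, pvR_idem]

-- A's loop over the rstripped lines equals the loop over the raw lines
theorem loopA_map_rstrip (ml : Int) (indent : String) (ls : List String) (kept : List String) :
    pvLoopA ml indent (ls.map PySem.Str.rstrip) kept = pvLoopA ml indent ls kept := by
  induction ls generalizing kept with
  | nil => rfl
  | cons l ls ih =>
    simp only [List.map_cons, pvLoopA, strip_rstrip]
    by_cases h1 : PySem.Str.strip l = ""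
    · rw [if_pos h1, if_pos h1]; exact ih kept
    · rw [if_neg h1, if_neg h1]
      by_cases h2 : (PySem.Str.startswith (PySem.Str.strip l) "Generated at " ||
          PySem.Str.startswith (PySem.Str.strip l) "Host:") = true
      · rw [if_pos h2, if_pos h2]; exact ih kept
      · rw [if_neg h2, if_neg h2]
        by_cases h3 : PySem.Str.startswith (PySem.Str.strip l) "# " = true
        · rw [if_pos h3, if_pos h3]; exact ih kept
        · rw [if_neg h3, if_neg h3]
          by_cases hb : ml ≤ (((kept ++ [indent ++ PySem.Str.strip l]).length : Int))
          · rw [if_pos hb, if_pos hb]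
          · rw [if_neg hb, if_neg hb]; exact ih _

-- A's loop with accumulator kept equals kept ++ B's budget-countdown take
theorem loopA_eq_take (ml : Int) (indent : String) (ls : List String) (kept : List String) :
    pvLoopA ml indent ls kept = kept ++ pvTakeB indent ls (ml - kept.length) := by
  induction ls generalizing kept with
  | nil => simp [pvLoopA, pvTakeB]
  | cons l ls ih =>
    simp only [pvLoopA, pvTakeB]
    by_cases h1 : PySem.Str.strip l = ""
    · have hic : pvIsContent (PySem.Str.strip l) = false := by
        simp only [pvIsContent, h1]; decide
      rw [if_pos h1]
      simp only [hic, Bool.not_false, if_true]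
      exact ih kept
    · rw [if_neg h1]
      by_cases h2 : (PySem.Str.startswith (PySem.Str.strip l) "Generated at " ||
          PySem.Str.startswith (PySem.Str.strip l) "Host:") = true
      · have hic : pvIsContent (PySem.Str.strip l) = false := by
          rcases Bool.or_eq_true _ _ |>.mp h2 with hx | hx <;>
            simp only [pvIsContent, hx, Bool.true_or, Bool.or_true, Bool.not_true,
              Bool.and_false]
        rw [if_pos h2]
        simp only [hic, Bool.not_false, if_true]
        exact ih kept
      · rw [if_neg h2]
        by_cases h3 : PySem.Str.startswith (PySem.Str.strip l) "# " = true
        · have hic : pvIsContent (PySem.Str.strip l) = false := by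
            simp only [pvIsContent, h3, Bool.or_true, Bool.not_true, Bool.and_false]
          rw [if_pos h3]
          simp only [hic, Bool.not_false, if_true]
          exact ih kept
        · rw [if_neg h3]
          have e2 : PySem.Str.startswith (PySem.Str.strip l) "Generated at " = false ∧
              PySem.Str.startswith (PySem.Str.strip l) "Host:" = false := by
            constructor <;>
              [skip; skip] <;>
              · rcases hG : PySem.Str.startswith (PySem.Str.strip l) "Generated at " with _|_ <;>
                rcases hH : PySem.Str.startswith (PySem.Str.strip l) "Host:" with _|_ <;>
                  simp_all
          have e3 : PySem.Str.startswith (PySem.Str.strip l) "# " = false := by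
            cases hx : PySem.Str.startswith (PySem.Str.strip l) "# " with
            | false => rfl
            | true => exact absurd hx h3
          have hne : (PySem.Str.strip l != "") = true := by
            simp only [bne_iff_ne, ne_eq]; exact h1
          have hic : pvIsContent (PySem.Str.strip l) = true := by
            simp only [pvIsContent, hne, e2.1, e2.2, e3, Bool.or_false, Bool.not_false,
              Bool.and_true]
          simp only [hic, Bool.not_true, Bool.false_eq_true, if_false]
          by_cases hb : ml ≤ (((kept ++ [indent ++ PySem.Str.strip l]).length : Int))
          · have hbud : ml - (kept.length : Int) ≤ 1 := by
              simp only [List.length_append, List.length_cons, List.length_nil] at hb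
              push_cast at hb ⊢; omega
            rw [if_pos hb, if_pos hbud]
            simp
          · have hbud : ¬ (ml - (kept.length : Int) ≤ 1) := by
              simp only [List.length_append, List.length_cons, List.length_nil] at hb
              push_cast at hb ⊢; omega
            rw [if_neg hb, if_neg hbud, ih (kept ++ [indent ++ PySem.Str.strip l])]
            simp only [List.length_append, List.length_cons, List.length_nil]
            push_cast
            rw [show ml - ((kept.length : Int) + 1) = ml - (kept.length : Int) - 1 from by omega]
            simp

-- ===== VERDICT (by name: the statement is the Claim_ definition above) =====
theorem summarize_for_daily_view_py_spec : Claim_equal_summarize_for_daily_view_py := by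
  intro text ml indent _
  unfold Spec_summarize_for_daily_view_py
  simp only [summarize_for_daily_view_py, summarize_for_daily_view_py_alt]
  rw [loopA_map_rstrip, loopA_eq_take]
  simp
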